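-- pv_equiv track=rewrite | github.com/Afroim/FBot.py | src/quadratic_oprox.py | quadratic_form_mod2
-- ===== SOURCE A (Python) =====
-- def quadratic_form_mod2(x, q_values):
--     n = len(x)
--     quadric = 0
--     idx = 0
--     for i in range(n):
--         for j in range(i, n):
--             quadric ^= q_values[idx] & x[i] & x[j]
--             idx += 1
--     return quadric
-- ===== SOURCE B (Python) =====
-- def quadratic_form_mod2(x, q_values):
--     # Recursive decomposition on the suffix of x: the first row pairs q-coefficients
--     # with x via zip (no index counter), then recurse on x[1:] with the remaining
--     # coefficients; row factor x[0] combined once per row (& distributes over ^).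
--     def go(xs, qs):
--         if not xs:
--             return 0
--         row = 0
--         for q, xj in zip(qs, xs):
--             row ^= q & xj
--         return (xs[0] & row) ^ go(xs[1:], qs[len(xs):])
--     return go(x, q_values)
-- ===== Notes on version B (the rewrite author's own statement) =====
-- stated objective: alternative
-- what changed: B replaces A's index-driven nested loops (running idx counter, q_values[idx], x[i], x[j] lookups) by structural recursion on the suffix of x: each row is built by zipping the remaining coefficients with the current suffix (no index arithmetic at all), the head factor x[0] is combined once per row, and the recursion continues on x[1:] with the sliced-off remainder of q_values.
import Mathlib
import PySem

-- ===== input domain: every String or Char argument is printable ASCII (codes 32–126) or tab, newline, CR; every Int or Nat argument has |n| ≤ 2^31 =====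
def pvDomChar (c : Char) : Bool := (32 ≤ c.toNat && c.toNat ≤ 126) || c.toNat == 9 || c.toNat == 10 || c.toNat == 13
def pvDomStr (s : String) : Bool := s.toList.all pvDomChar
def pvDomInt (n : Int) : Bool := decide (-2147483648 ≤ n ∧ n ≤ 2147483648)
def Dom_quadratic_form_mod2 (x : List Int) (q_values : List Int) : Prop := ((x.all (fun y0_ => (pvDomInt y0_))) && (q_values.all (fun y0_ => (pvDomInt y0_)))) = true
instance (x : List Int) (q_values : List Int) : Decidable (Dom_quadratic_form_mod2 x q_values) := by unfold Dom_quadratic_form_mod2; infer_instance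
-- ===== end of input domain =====

-- ===== PORT A =====
-- B replaces A's index-driven nested loops by structural recursion on the suffix of x,
-- building each row with zip (no index counter); return values proved equal.
def quadratic_form_mod2 (x : List Int) (q_values : List Int) : Int :=
  let n : Int := (x.length : Int)
  -- quadric = 0; idx = 0; nested for-loops carried as the pair (quadric, idx)
  let s : Int × Int :=
    (PySem.List.pyRange 0 n 1).foldl (fun (s : Int × Int) i =>
      (PySem.List.pyRange i n 1).foldl (fun (t : Int × Int) j =>
        (PySem.Int.bxor t.1
          (PySem.Int.band (PySem.Int.band (PySem.List.pyGetD q_values t.2 0) (PySem.List.pyGetD x i 0))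
            (PySem.List.pyGetD x j 0)),
         t.2 + 1)) s) (0, 0)
  s.1

-- ===== PORT B =====
-- go(xs, qs): 0 on empty xs; else row = XOR of q & xj over zip(qs, xs),
-- then (xs[0] & row) ^ go(xs[1:], qs[len(xs):])
def qfGo (xs : List Int) (qs : List Int) : Int :=
  match xs with
  | [] => 0
  | h :: t =>
    let row : Int :=
      (qs.zip (h :: t)).foldl (fun r p => PySem.Int.bxor r (PySem.Int.band p.1 p.2)) 0
    PySem.Int.bxor (PySem.Int.band h row)
      (qfGo t (PySem.List.slice qs (some (((h :: t).length : Nat) : Int)) none))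

def quadratic_form_mod2_alt (x : List Int) (q_values : List Int) : Int :=
  qfGo x q_values

-- ===== PRECONDITION & SPEC =====
-- Pre_: the Python A indexes q_values[idx] for idx = 0 .. n*(n+1)/2 - 1 (n = len(x));
-- it raises IndexError iff q_values is shorter than that, so exactly those inputs are excluded.
def Pre_quadratic_form_mod2 (x : List Int) (q_values : List Int) : Prop :=
  x.length * (x.length + 1) / 2 ≤ q_values.length
instance (x : List Int) (q_values : List Int) : Decidable (Pre_quadratic_form_mod2 x q_values) := by
  unfold Pre_quadratic_form_mod2; infer_instance
def pvWitness_quadratic_form_mod2 : List Int × List Int := ([1, 2], [3, 4, 5])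

def Spec_quadratic_form_mod2 (x : List Int) (q_values : List Int) (out : Int) : Prop := out = quadratic_form_mod2_alt x q_values
instance (x : List Int) (q_values : List Int) (out : Int) : Decidable (Spec_quadratic_form_mod2 x q_values out) := by unfold Spec_quadratic_form_mod2; infer_instance

-- ===== CLAIM (what is proved, stated in full; the proofs are below) =====
def Claim_equal_quadratic_form_mod2 : Prop := ∀ (x : List Int) (q_values : List Int), Dom_quadratic_form_mod2 x q_values → Pre_quadratic_form_mod2 x q_values → Spec_quadratic_form_mod2 x q_values (quadratic_form_mod2 x q_values)

-- ===== LEMMAS AND PROOFS =====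

-- Bit-level groundwork: PySem.Int.band/bxor agree with Mathlib's Int.land/Int.xor,
-- giving associativity of & and distributivity of & over ^ (Python semantics on all ints).

-- subtracting a submask is XOR with it
theorem sub_eq_xor_of_and_eq_self (m k : Nat) (h : k &&& m = k) : m - k = m ^^^ k := by
  induction m using Nat.strong_induction_on generalizing k with
  | _ m IH =>
    rcases Nat.eq_zero_or_pos m with rfl | hm
    · simp at h; simp [h]
    · have h2 : (k / 2) &&& (m / 2) = k / 2 := by
        rw [← Nat.and_div_two, h]
      have IH2 := IH (m / 2) (by omega) (k / 2) h2
      have hkm : k ≤ m := h ▸ Nat.and_le_right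
      have hk2m2 : k / 2 ≤ m / 2 := h2 ▸ Nat.and_le_right
      have hx2 : (m ^^^ k) / 2 = m / 2 ^^^ k / 2 := Nat.xor_div_two
      have hxm : (m ^^^ k) % 2 = (m + k) % 2 := Nat.xor_mod_two_eq
      have hbit : k % 2 = 1 → m % 2 = 1 := by
        intro hk1
        have : (k &&& m) % 2 = 1 → k % 2 = 1 ∧ m % 2 = 1 := (Nat.and_mod_two_eq_one).mp
        rw [h] at this
        exact (this hk1).2
      have hm2 := Nat.mod_two_eq_zero_or_one m
      have hk2 := Nat.mod_two_eq_zero_or_one k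
      have em : m = 2 * (m / 2) + m % 2 := (Nat.div_add_mod m 2).symm ▸ by omega
      have ek : k = 2 * (k / 2) + k % 2 := by omega
      have ex : m ^^^ k = 2 * ((m ^^^ k) / 2) + (m ^^^ k) % 2 := by omega
      rw [hx2, hxm] at ex
      rcases hm2 with h1 | h1 <;> rcases hk2 with h0 | h0 <;> omega

theorem xor_and_eq_ldiff (m n : Nat) : m ^^^ (m &&& n) = m.ldiff n := by
  apply Nat.eq_of_testBit_eq
  intro i
  simp [Nat.testBit_xor, Nat.testBit_and, Nat.testBit_ldiff]
  cases m.testBit i <;> cases n.testBit i <;> rfl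

theorem sub_and_eq_ldiff (m n : Nat) : m - (m &&& n) = m.ldiff n := by
  rw [← xor_and_eq_ldiff]
  apply sub_eq_xor_of_and_eq_self
  rw [Nat.and_comm m n, Nat.and_assoc, Nat.and_self, Nat.and_comm n m]

theorem neg_eq_negSucc (a : Int) (h : a < 0) : a = Int.negSucc (-a - 1).toNat := by
  rw [Int.negSucc_eq]; omega

theorem band_eq_land (a b : Int) : PySem.Int.band a b = Int.land a b := by
  rcases lt_or_ge a 0 with ha | ha <;> rcases lt_or_ge b 0 with hb | hb
  · rw [neg_eq_negSucc a ha, neg_eq_negSucc b hb]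
    simp [PySem.Int.band, Int.land, Int.negSucc_eq]
    omega
  · rw [neg_eq_negSucc a ha]
    obtain ⟨n, rfl⟩ := Int.eq_ofNat_of_zero_le hb
    simp [PySem.Int.band, Int.land, Int.negSucc_eq, sub_and_eq_ldiff]
    omega
  · rw [neg_eq_negSucc b hb]
    obtain ⟨m, rfl⟩ := Int.eq_ofNat_of_zero_le ha
    simp [PySem.Int.band, Int.land, Int.negSucc_eq, sub_and_eq_ldiff]
    omega
  · obtain ⟨m, rfl⟩ := Int.eq_ofNat_of_zero_le ha
    obtain ⟨n, rfl⟩ := Int.eq_ofNat_of_zero_le hb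
    simp [PySem.Int.band, Int.land]

theorem bxor_eq_xor (a b : Int) : PySem.Int.bxor a b = Int.xor a b := by
  rcases lt_or_ge a 0 with ha | ha <;> rcases lt_or_ge b 0 with hb | hb
  · rw [neg_eq_negSucc a ha, neg_eq_negSucc b hb]
    simp [PySem.Int.bxor, Int.xor, Int.negSucc_eq]
    omega
  · rw [neg_eq_negSucc a ha]
    obtain ⟨n, rfl⟩ := Int.eq_ofNat_of_zero_le hb
    simp [PySem.Int.bxor, Int.xor, Int.negSucc_eq]
    omega
  · rw [neg_eq_negSucc b hb]
    obtain ⟨m, rfl⟩ := Int.eq_ofNat_of_zero_le ha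
    simp [PySem.Int.bxor, Int.xor, Int.negSucc_eq]
    omega
  · obtain ⟨m, rfl⟩ := Int.eq_ofNat_of_zero_le ha
    obtain ⟨n, rfl⟩ := Int.eq_ofNat_of_zero_le hb
    simp [PySem.Int.bxor, Int.xor]

theorem testBit_add_false (m n : Nat) : m.testBit (m + n) = false :=
  Nat.testBit_lt_two_pow (Nat.lt_of_lt_of_le Nat.lt_two_pow_self (Nat.pow_le_pow_right (by omega) (by omega)))

theorem int_testBit_ext (a b : Int) (h : ∀ k, a.testBit k = b.testBit k) : a = b := by
  cases a with
  | ofNat m => cases b with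
    | ofNat n => exact congrArg Int.ofNat (Nat.eq_of_testBit_eq h)
    | negSucc n =>
      exfalso
      have hk := h (m + n)
      have h1 : m.testBit (m + n) = false := testBit_add_false m n
      have h2 : n.testBit (m + n) = false := Nat.add_comm m n ▸ testBit_add_false n m
      simp [Int.testBit, h1, h2] at hk
  | negSucc m => cases b with
    | ofNat n =>
      exfalso
      have hk := h (m + n)
      have h1 : m.testBit (m + n) = false := testBit_add_false m n
      have h2 : n.testBit (m + n) = false := Nat.add_comm m n ▸ testBit_add_false n m
      simp [Int.testBit, h1, h2] at hk
    | negSucc n =>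
      have : m = n := Nat.eq_of_testBit_eq (fun k => by have := h k; simpa [Int.testBit] using this)
      rw [this]

theorem bxor_assoc' (a b c : Int) : PySem.Int.bxor (PySem.Int.bxor a b) c = PySem.Int.bxor a (PySem.Int.bxor b c) := by
  simp only [bxor_eq_xor]
  apply int_testBit_ext; intro k
  simp [Int.testBit_lxor]

theorem band_bxor_distrib (a b c : Int) : PySem.Int.band a (PySem.Int.bxor b c) = PySem.Int.bxor (PySem.Int.band a b) (PySem.Int.band a c) := by
  simp only [band_eq_land, bxor_eq_xor]
  apply int_testBit_ext; intro k
  simp [Int.testBit_land, Int.testBit_lxor]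
  cases a.testBit k <;> cases b.testBit k <;> cases c.testBit k <;> rfl

-- a & (b & c) = (b & a) & c — the regrouping the row factoring needs
theorem band_rot (a b c : Int) : PySem.Int.band a (PySem.Int.band b c) = PySem.Int.band (PySem.Int.band b a) c := by
  simp only [band_eq_land]
  apply int_testBit_ext; intro k
  simp [Int.testBit_land]
  cases a.testBit k <;> cases b.testBit k <;> cases c.testBit k <;> rfl

theorem bxor_zero_left (a : Int) : PySem.Int.bxor 0 a = a := by
  rw [PySem.Int.bxor_comm, PySem.Int.bxor_zero]

theorem band_zero_left (a : Int) : PySem.Int.band 0 a = 0 := by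
  rw [PySem.Int.band_comm, PySem.Int.band_zero]

-- B's row fold is XOR-affine in its accumulator
theorem row_affine (l : List (Int × Int)) (a : Int) :
    l.foldl (fun r p => PySem.Int.bxor r (PySem.Int.band p.1 p.2)) a
    = PySem.Int.bxor a (l.foldl (fun r p => PySem.Int.bxor r (PySem.Int.band p.1 p.2)) 0) := by
  induction l generalizing a with
  | nil => simp [List.foldl, PySem.Int.bxor_zero]
  | cons p l IH =>
    simp only [List.foldl]
    rw [IH (PySem.Int.bxor a (PySem.Int.band p.1 p.2)), IH (PySem.Int.bxor 0 (PySem.Int.band p.1 p.2)),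
        bxor_zero_left, bxor_assoc']

-- A's inner loop over j = m..n-1 equals x[i] & (zip-row of B) and advances idx by the row length
theorem inner_row (x q : List Int) (xi : Int) (c : Nat) :
    ∀ (m idx quad : Int), 0 ≤ m → 0 ≤ idx → m + (c : Int) = (x.length : Int) →
    (PySem.List.pyRange m ((x.length : Int)) 1).foldl
      (fun (t : Int × Int) j =>
        (PySem.Int.bxor t.1
          (PySem.Int.band (PySem.Int.band (PySem.List.pyGetD q t.2 0) xi) (PySem.List.pyGetD x j 0)),
         t.2 + 1)) (quad, idx)
    = (PySem.Int.bxor quad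
        (PySem.Int.band xi
          (((q.drop idx.toNat).zip (x.drop m.toNat)).foldl
            (fun r p => PySem.Int.bxor r (PySem.Int.band p.1 p.2)) 0)),
       idx + (c : Int)) := by
  induction c with
  | zero =>
    intro m idx quad hm hidx hc
    have hmlen : m.toNat = x.length := by omega
    rw [PySem.List.pyRange_one_eq_nil (by omega)]
    simp [List.foldl, List.drop_eq_nil_of_le (by omega : x.length ≤ m.toNat),
      PySem.Int.band_zero, PySem.Int.bxor_zero]
  | succ c IH =>
    intro m idx quad hm hidx hc
    have hmlt : m.toNat < x.length := by omega
    rw [PySem.List.pyRange_one_cons (by omega)]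
    simp only [List.foldl]
    rw [IH (m + 1) (idx + 1) _ (by omega) (by omega) (by omega)]
    have hxdrop : x.drop m.toNat = x[m.toNat] :: x.drop (m.toNat + 1) :=
      List.drop_eq_getElem_cons hmlt
    have hm1 : (m + 1).toNat = m.toNat + 1 := by omega
    have hi1 : (idx + 1).toNat = idx.toNat + 1 := by omega
    have hxm : PySem.List.pyGetD x m 0 = x[m.toNat] :=
      PySem.List.pyGetD_eq_getElem x 0 hm (by omega)
    rw [hm1, hi1]
    rcases Nat.lt_or_ge idx.toNat q.length with hq | hq
    · -- q[idx] exists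
      have hqdrop : q.drop idx.toNat = q[idx.toNat] :: q.drop (idx.toNat + 1) :=
        List.drop_eq_getElem_cons hq
      have hqv : PySem.List.pyGetD q idx 0 = q[idx.toNat] :=
        PySem.List.pyGetD_eq_getElem q 0 hidx (by omega)
      rw [hqdrop, hxdrop]
      simp only [List.zip_cons_cons, List.foldl]
      rw [row_affine _ (PySem.Int.bxor 0 (PySem.Int.band q[idx.toNat] x[m.toNat])), bxor_zero_left]
      rw [band_bxor_distrib, hqv, hxm]
      rw [band_rot xi q[idx.toNat] x[m.toNat]]
      rw [Prod.mk.injEq]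
      constructor
      · rw [bxor_assoc']
      · omega
    · -- q exhausted: the remaining q lookups are the default 0
      have hqnil : q.drop idx.toNat = [] := List.drop_eq_nil_of_le hq
      have hqnil1 : q.drop (idx.toNat + 1) = [] := List.drop_eq_nil_of_le (by omega)
      have hqv : PySem.List.pyGetD q idx 0 = 0 := by
        have : idx = ((idx.toNat : Nat) : Int) := by omega
        rw [this, PySem.List.pyGetD_natCast]
        exact List.getD_eq_default _ _ hq
      rw [hqnil, hqnil1, hqv, band_zero_left, band_zero_left, PySem.Int.bxor_zero]
      simp only [List.zip_nil_left, List.foldl]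
      rw [Prod.mk.injEq]
      constructor
      · rfl
      · omega

-- A's outer loop from row m equals quad ^ go(x[m:], q[idx:])
theorem outer_go (x q : List Int) (c : Nat) :
    ∀ (m idx quad : Int), 0 ≤ m → 0 ≤ idx → m + (c : Int) = (x.length : Int) →
    ((PySem.List.pyRange m ((x.length : Int)) 1).foldl
      (fun (s : Int × Int) i =>
        (PySem.List.pyRange i ((x.length : Int)) 1).foldl
          (fun (t : Int × Int) j =>
            (PySem.Int.bxor t.1
              (PySem.Int.band (PySem.Int.band (PySem.List.pyGetD q t.2 0) (PySem.List.pyGetD x i 0))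
                (PySem.List.pyGetD x j 0)),
             t.2 + 1)) s) (quad, idx)).1
    = PySem.Int.bxor quad (qfGo (x.drop m.toNat) (q.drop idx.toNat)) := by
  induction c with
  | zero =>
    intro m idx quad hm hidx hc
    rw [PySem.List.pyRange_one_eq_nil (by omega)]
    rw [List.drop_eq_nil_of_le (by omega : x.length ≤ m.toNat)]
    simp [List.foldl, qfGo, PySem.Int.bxor_zero]
  | succ c IH =>
    intro m idx quad hm hidx hc
    have hmlt : m.toNat < x.length := by omega
    rw [PySem.List.pyRange_one_cons (by omega)]
    simp only [List.foldl]
    rw [inner_row x q (PySem.List.pyGetD x m 0) (c + 1) m idx quad hm hidx (by omega)]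
    have hcast : (((c + 1 : Nat)) : Int) = (c : Int) + 1 := by push_cast; ring
    rw [hcast]
    rw [IH (m + 1) (idx + ((c : Int) + 1)) _ (by omega) (by omega) (by omega)]
    have hxdrop : x.drop m.toNat = x[m.toNat] :: x.drop (m.toNat + 1) :=
      List.drop_eq_getElem_cons hmlt
    have hxm : PySem.List.pyGetD x m 0 = x[m.toNat] :=
      PySem.List.pyGetD_eq_getElem x 0 hm (by omega)
    have hm1 : (m + 1).toNat = m.toNat + 1 := by omega
    have hlen : (x[m.toNat] :: x.drop (m.toNat + 1)).length = c + 1 := by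
      simp [List.length_drop]; omega
    rw [hm1, hxdrop]
    -- unfold one step of qfGo
    show _ = PySem.Int.bxor quad
      (PySem.Int.bxor
        (PySem.Int.band x[m.toNat]
          (((q.drop idx.toNat).zip (x[m.toNat] :: x.drop (m.toNat + 1))).foldl
            (fun r p => PySem.Int.bxor r (PySem.Int.band p.1 p.2)) 0))
        (qfGo (x.drop (m.toNat + 1))
          (PySem.List.slice (q.drop idx.toNat)
            (some (((x[m.toNat] :: x.drop (m.toNat + 1)).length : Nat) : Int)) none)))
    rw [PySem.List.slice_from_natCast, hlen, List.drop_drop]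
    have hidx2 : (idx + ((c : Int) + 1)).toNat = idx.toNat + (c + 1) := by omega
    rw [hidx2, hxm, ← hxdrop, bxor_assoc']

theorem ports_eq (x q_values : List Int) :
    quadratic_form_mod2 x q_values = quadratic_form_mod2_alt x q_values := by
  dsimp only [quadratic_form_mod2, quadratic_form_mod2_alt]
  rw [outer_go x q_values x.length 0 0 0 (le_refl 0) (le_refl 0) (by omega)]
  rw [bxor_zero_left]
  simp [List.drop_zero]

-- ===== VERDICT (by name: the statement is the Claim_ definition above) =====
theorem quadratic_form_mod2_spec : Claim_equal_quadratic_form_mod2 := by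
  intro x q_values _ _
  unfold Spec_quadratic_form_mod2
  exact ports_eq x q_values
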